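-- pv_equiv track=rewrite | github.com/anetryg/python2023 | 04-funkce/04-ukoly_hodina.py | analyza_textu
-- ===== SOURCE A (Python) =====
-- def analyza_textu(text):
--     interpunkce = [".", "!", "?"]
--
--     slova = text.split()
--     pocet_slov = len(slova)
--
--     pocet_vet = 0
--     for znak in interpunkce:
--         pocet_vet += text.count(znak)
--
--     return pocet_slov, pocet_vet
-- ===== SOURCE B (Python) =====
-- def analyza_textu(text):
--     pocet_slov = 0
--     pocet_vet = 0
--     in_word = False
--     for znak in text:
--         if znak.isspace():
--             in_word = False
--         elif not in_word:
--             pocet_slov += 1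
--             in_word = True
--         if znak in ".!?":
--             pocet_vet += 1
--     return pocet_slov, pocet_vet
-- ===== Notes on version B (the rewrite author's own statement) =====
-- stated objective: alternative
-- what changed: Replaces str.split() plus three text.count passes by a single character loop maintaining an in_word flag and both counters in one pass.
import Mathlib
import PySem

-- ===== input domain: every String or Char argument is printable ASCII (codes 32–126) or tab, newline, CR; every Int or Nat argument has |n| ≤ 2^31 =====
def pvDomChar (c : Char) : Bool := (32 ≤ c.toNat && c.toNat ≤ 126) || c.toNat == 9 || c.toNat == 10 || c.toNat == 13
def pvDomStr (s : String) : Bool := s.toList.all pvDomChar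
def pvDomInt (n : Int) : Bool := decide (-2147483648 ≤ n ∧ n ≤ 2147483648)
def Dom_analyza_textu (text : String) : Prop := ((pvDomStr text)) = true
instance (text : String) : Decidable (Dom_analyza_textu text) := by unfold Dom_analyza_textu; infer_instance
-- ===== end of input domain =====

-- B replaces split() plus three count() passes by one character loop with an in_word flag (alternative decomposition, same cost).

-- ===== PORT A =====
def analyza_textu (text : String) : Int × Int :=
  let interpunkce : List String := [".", "!", "?"]
  let slova := PySem.Str.split₀ text
  let pocet_slov : Int := slova.length
  let pocet_vet : Int := interpunkce.foldl (fun acc znak => acc + (PySem.Str.count text znak : Int)) 0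
  (pocet_slov, pocet_vet)

-- ===== PORT B =====
def analyza_textu_alt (text : String) : Int × Int :=
  let r : Bool × Int × Int := text.toList.foldl
    (fun s znak =>
      let s1 : Bool × Int :=
        if PySem.Chars.isspace znak then (false, s.2.1)
        else if !s.1 then (true, s.2.1 + 1)
        else (s.1, s.2.1)
      let v : Int := if znak = '.' ∨ znak = '!' ∨ znak = '?' then s.2.2 + 1 else s.2.2
      (s1.1, s1.2, v))
    (false, 0, 0)
  (r.2.1, r.2.2)

-- ===== PRECONDITION & SPEC =====
def Spec_analyza_textu (text : String) (out : Int × Int) : Prop := out = analyza_textu_alt text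
instance (text : String) (out : Int × Int) : Decidable (Spec_analyza_textu text out) := by unfold Spec_analyza_textu; infer_instance

-- ===== CLAIM (what is proved, stated in full; the proofs are below) =====
def Claim_equal_analyza_textu : Prop := ∀ (text : String), Dom_analyza_textu text → Spec_analyza_textu text (analyza_textu text)

-- ===== LEMMAS AND PROOFS =====

-- number of word starts in l, given whether we are currently inside a word
def pvS : List Char → Bool → Nat
  | [], _ => 0
  | c :: t, inw =>
    if PySem.Chars.isspace c then pvS t false
    else (if inw then 0 else 1) + pvS t true

-- in-word flag after scanning l
def pvE : List Char → Bool → Bool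
  | [], inw => inw
  | c :: t, _ => if PySem.Chars.isspace c then pvE t false else pvE t true

-- number of sentence-ending marks in l
def pvP : List Char → Nat
  | [] => 0
  | c :: t => (if c = '.' ∨ c = '!' ∨ c = '?' then 1 else 0) + pvP t

theorem pv_go_len (l : List Char) : ∀ (cur : List Char) (acc : List (List Char)),
    (PySem.Chars.split₀.go l cur acc).length
      = acc.length + pvS l (!cur.isEmpty) + (if cur.isEmpty then 0 else 1) := by
  induction l with
  | nil =>
    intro cur acc
    by_cases h : cur.isEmpty <;> simp [PySem.Chars.split₀.go, pvS, h]
  | cons c t ih =>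
    intro cur acc
    by_cases hs : PySem.Chars.isspace c
    · by_cases h : cur.isEmpty <;>
        simp [PySem.Chars.split₀.go, pvS, hs, h, ih] <;> omega
    · by_cases h : cur.isEmpty <;>
        simp [PySem.Chars.split₀.go, pvS, hs, h, ih] <;> omega

theorem pv_split_len (l : List Char) : (PySem.Chars.split₀ l).length = pvS l false := by
  have := pv_go_len l [] []
  simpa [PySem.Chars.split₀] using this

theorem pv_count_go_single (c : Char) (l : List Char) : ∀ (fuel acc : Nat),
    l.length ≤ fuel → PySem.Chars.count.go [c] fuel l acc = acc + l.count c := by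
  induction l with
  | nil =>
    intro fuel acc _
    cases fuel <;> simp [PySem.Chars.count.go]
  | cons h t ih =>
    intro fuel acc hf
    cases fuel with
    | zero => simp at hf
    | succ f =>
      have hf' : t.length ≤ f := by simpa using hf
      by_cases he : c = h
      · have hp : ([c].isPrefixOf (h :: t)) = true := by simp [List.isPrefixOf, he]
        simp only [PySem.Chars.count.go, hp, if_pos, List.length_cons, List.length_nil,
          Nat.zero_add, List.drop_succ_cons, List.drop_zero]
        rw [ih f (acc + 1) hf']
        simp [List.count_cons, he]
        omega
      · have hp : ([c].isPrefixOf (h :: t)) = false := by simp [List.isPrefixOf, he]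
        simp only [PySem.Chars.count.go, hp, Bool.false_eq_true, if_false]
        rw [ih f acc hf']
        have hne : ¬ h = c := fun h' => he h'.symm
        simp [List.count_cons, hne]

theorem pv_count_single (c : Char) (l : List Char) :
    PySem.Chars.count l [c] = l.count c := by
  simp [PySem.Chars.count, pv_count_go_single c l l.length 0 le_rfl]

theorem pv_pP_counts (l : List Char) :
    (pvP l : Int) = (l.count '.' : Int) + l.count '!' + l.count '?' := by
  induction l with
  | nil => simp [pvP]
  | cons c t ih =>
    by_cases h1 : c = '.' <;> by_cases h2 : c = '!' <;> by_cases h3 : c = '?' <;>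
      simp_all [pvP, List.count_cons] <;> omega

theorem pv_loop (l : List Char) : ∀ (s : Bool × Int × Int),
    l.foldl
      (fun (s : Bool × Int × Int) znak =>
        let s1 : Bool × Int :=
          if PySem.Chars.isspace znak then (false, s.2.1)
          else if !s.1 then (true, s.2.1 + 1)
          else (s.1, s.2.1)
        let v : Int := if znak = '.' ∨ znak = '!' ∨ znak = '?' then s.2.2 + 1 else s.2.2
        (s1.1, s1.2, v))
      s
      = (pvE l s.1, s.2.1 + (pvS l s.1 : Int), s.2.2 + (pvP l : Int)) := by
  induction l with
  | nil => intro s; simp [pvE, pvS, pvP]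
  | cons c t ih =>
    intro s
    obtain ⟨a, b, d⟩ := s
    rw [List.foldl_cons, ih]
    cases a <;> by_cases hs : PySem.Chars.isspace c <;>
      by_cases hp : c = '.' ∨ c = '!' ∨ c = '?' <;>
      simp [hs, hp, pvE, pvS, pvP] <;> omega

-- ===== VERDICT (by name: the statement is the Claim_ definition above) =====
theorem analyza_textu_spec : Claim_equal_analyza_textu := by
  intro text _
  unfold Spec_analyza_textu analyza_textu analyza_textu_alt
  rw [pv_loop text.toList (false, 0, 0)]
  simp [PySem.Str.split₀, PySem.Str.count_eq, pv_split_len, pv_count_single, pv_pP_counts]
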